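-- pv_equiv track=rewrite | github.com/shromann/RoPaSci-360-Ai | XAEA_Xii/board.py | play_rps
-- ===== SOURCE A (Python) =====
-- def play_rps(state_loc):
--     # Minimizez the hex at a particular location. The hex can have both upper and lowers tokens as well as its own type.
--
--     toks = ['r', 's', 'p']
--     to_remove = []
--     for t in range(3):
--         win = toks[t]
--         lose = toks[(t+1)%3]
--         if (win in state_loc and lose in state_loc) or (win.upper() in state_loc and lose in state_loc):
--             to_remove.append(lose)
--         if (win.upper() in state_loc and lose.upper() in state_loc) or (win in state_loc and lose.upper() in state_loc):
--             to_remove.append(lose.upper())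
--
--     for r in to_remove:
--         state_loc = list(filter(lambda t: t != r, state_loc))
--     return state_loc
-- ===== SOURCE B (Python) =====
-- def play_rps(state_loc):
--     # beats[c] is the (lowercase) token that defeats c
--     beats = {'s': 'r', 'S': 'r', 'p': 's', 'P': 's', 'r': 'p', 'R': 'p'}
--     return [c for c in state_loc
--             if c not in beats
--             or (beats[c] not in state_loc and beats[c].upper() not in state_loc)]
-- ===== Notes on version B (the rewrite author's own statement) =====
-- stated objective: simpler
-- what changed: Replaced A's two-phase scheme (loop over the three RPS types building a to_remove list, then one full filter pass per removed token) with a single list comprehension over the tokens that keeps a token iff the token that beats it (looked up in a 6-entry beater dict) is absent in both cases.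
import Mathlib
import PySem

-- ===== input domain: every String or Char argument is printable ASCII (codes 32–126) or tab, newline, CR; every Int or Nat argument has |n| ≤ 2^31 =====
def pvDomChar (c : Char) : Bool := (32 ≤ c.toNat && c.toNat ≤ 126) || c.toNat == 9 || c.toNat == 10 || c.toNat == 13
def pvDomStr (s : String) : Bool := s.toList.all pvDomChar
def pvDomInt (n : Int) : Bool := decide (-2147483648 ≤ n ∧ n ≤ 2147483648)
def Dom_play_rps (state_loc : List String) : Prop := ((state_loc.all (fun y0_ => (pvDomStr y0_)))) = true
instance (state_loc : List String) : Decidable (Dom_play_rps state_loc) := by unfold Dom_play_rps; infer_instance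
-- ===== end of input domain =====

-- B replaces A's two-phase "loop over the three types building to_remove, then successive filter passes"
-- by one direct comprehension over the tokens using a beater map (objective: simpler).


-- ===== PORT A =====
def play_rps (state_loc : List String) : List String :=
  let toks : List String := ["r", "s", "p"]
  let to_remove : List String :=
    (PySem.List.pyRange 0 3 1).foldl (fun tr t =>
      let win := (PySem.List.pyGet? toks t).getD ""      -- t ∈ {0,1,2}: index always in range, getD default never used
      let lose := (PySem.List.pyGet? toks (PySem.Int.mod (t + 1) 3)).getD ""
      let tr := if (win ∈ state_loc ∧ lose ∈ state_loc) ∨ (PySem.Str.upper win ∈ state_loc ∧ lose ∈ state_loc)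
                then tr ++ [lose] else tr
      if (PySem.Str.upper win ∈ state_loc ∧ PySem.Str.upper lose ∈ state_loc) ∨ (win ∈ state_loc ∧ PySem.Str.upper lose ∈ state_loc)
      then tr ++ [PySem.Str.upper lose] else tr) []
  to_remove.foldl (fun sl r => sl.filter (fun t => t != r)) state_loc

-- ===== PORT B =====
-- beats : beats[c] is the token that defeats c (B's dict literal)
def pvBeats : PySem.Dict String String :=
  PySem.Dict.ofList [("s", "r"), ("S", "r"), ("p", "s"), ("P", "s"), ("r", "p"), ("R", "p")]

def play_rps_alt (state_loc : List String) : List String :=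
  state_loc.filter (fun c =>
    match PySem.Dict.get? pvBeats c with
    | none => true
    | some b => decide (b ∉ state_loc ∧ PySem.Str.upper b ∉ state_loc))

-- ===== PRECONDITION & SPEC =====
def Spec_play_rps (state_loc : List String) (out : List String) : Prop := out = play_rps_alt state_loc
instance (state_loc : List String) (out : List String) : Decidable (Spec_play_rps state_loc out) := by unfold Spec_play_rps; infer_instance

-- ===== CLAIM (what is proved, stated in full; the proofs are below) =====
def Claim_equal_play_rps : Prop := ∀ (state_loc : List String), Dom_play_rps state_loc → Spec_play_rps state_loc (play_rps state_loc)

-- ===== LEMMAS AND PROOFS =====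

-- the removal list A builds, written as a concatenation of conditional singletons
def pvToRem (L : List String) : List String :=
  (if ("r" ∈ L ∧ "s" ∈ L) ∨ ("R" ∈ L ∧ "s" ∈ L) then ["s"] else []) ++
  (if ("R" ∈ L ∧ "S" ∈ L) ∨ ("r" ∈ L ∧ "S" ∈ L) then ["S"] else []) ++
  (if ("s" ∈ L ∧ "p" ∈ L) ∨ ("S" ∈ L ∧ "p" ∈ L) then ["p"] else []) ++
  (if ("S" ∈ L ∧ "P" ∈ L) ∨ ("s" ∈ L ∧ "P" ∈ L) then ["P"] else []) ++
  (if ("p" ∈ L ∧ "r" ∈ L) ∨ ("P" ∈ L ∧ "r" ∈ L) then ["r"] else []) ++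
  (if ("P" ∈ L ∧ "R" ∈ L) ∨ ("p" ∈ L ∧ "R" ∈ L) then ["R"] else [])

lemma foldl_filter_ne (rs s : List String) :
    rs.foldl (fun sl r => sl.filter (fun t => t != r)) s
      = s.filter (fun c => !rs.contains c) := by
  induction rs generalizing s with
  | nil => simp
  | cons r rs ih =>
      simp only [List.foldl_cons, ih, List.filter_filter]
      apply List.filter_congr
      intro c _
      by_cases h : c = r <;> simp [h, Bool.and_comm]

lemma play_rps_eq_filter (L : List String) :
    play_rps L = L.filter (fun c => !(pvToRem L).contains c) := by
  have hr : PySem.List.pyRange 0 3 1 = [0, 1, 2] := by decide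
  unfold play_rps
  rw [hr, foldl_filter_ne]
  simp only [List.foldl_cons, List.foldl_nil]
  rw [show PySem.Int.mod (0 + 1) 3 = 1 from by decide,
      show PySem.Int.mod (1 + 1) 3 = 2 from by decide,
      show PySem.Int.mod (2 + 1) 3 = 0 from by decide,
      show (PySem.List.pyGet? ["r", "s", "p"] 0).getD "" = "r" from by decide,
      show (PySem.List.pyGet? ["r", "s", "p"] 1).getD "" = "s" from by decide,
      show (PySem.List.pyGet? ["r", "s", "p"] 2).getD "" = "p" from by decide,
      show PySem.Str.upper "r" = "R" from by decide,
      show PySem.Str.upper "s" = "S" from by decide,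
      show PySem.Str.upper "p" = "P" from by decide]
  by_cases c1 : ("r" ∈ L ∧ "s" ∈ L) ∨ ("R" ∈ L ∧ "s" ∈ L) <;>
  by_cases c2 : ("R" ∈ L ∧ "S" ∈ L) ∨ ("r" ∈ L ∧ "S" ∈ L) <;>
  by_cases c3 : ("s" ∈ L ∧ "p" ∈ L) ∨ ("S" ∈ L ∧ "p" ∈ L) <;>
  by_cases c4 : ("S" ∈ L ∧ "P" ∈ L) ∨ ("s" ∈ L ∧ "P" ∈ L) <;>
  by_cases c5 : ("p" ∈ L ∧ "r" ∈ L) ∨ ("P" ∈ L ∧ "r" ∈ L) <;>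
  by_cases c6 : ("P" ∈ L ∧ "R" ∈ L) ∨ ("p" ∈ L ∧ "R" ∈ L) <;>
  simp [pvToRem, c1, c2, c3, c4, c5, c6]

lemma point_eq (L : List String) (c : String) (hc : c ∈ L) :
    (!(pvToRem L).contains c) =
      (match PySem.Dict.get? pvBeats c with
        | none => true
        | some b => decide (b ∉ L ∧ PySem.Str.upper b ∉ L)) := by
  by_cases h1 : c = "s"
  · subst h1
    rw [show pvBeats.get? "s" = some "r" from by decide]
    by_cases hx : ("r" : String) ∈ L <;> by_cases hy : ("R" : String) ∈ L <;>
      simp [pvToRem, hx, hy, hc, show PySem.Str.upper "r" = "R" from by decide]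
  by_cases h2 : c = "S"
  · subst h2
    rw [show pvBeats.get? "S" = some "r" from by decide]
    by_cases hx : ("r" : String) ∈ L <;> by_cases hy : ("R" : String) ∈ L <;>
      simp [pvToRem, hx, hy, hc, show PySem.Str.upper "r" = "R" from by decide]
  by_cases h3 : c = "p"
  · subst h3
    rw [show pvBeats.get? "p" = some "s" from by decide]
    by_cases hx : ("s" : String) ∈ L <;> by_cases hy : ("S" : String) ∈ L <;>
      simp [pvToRem, hx, hy, hc, show PySem.Str.upper "s" = "S" from by decide]
  by_cases h4 : c = "P"
  · subst h4
    rw [show pvBeats.get? "P" = some "s" from by decide]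
    by_cases hx : ("s" : String) ∈ L <;> by_cases hy : ("S" : String) ∈ L <;>
      simp [pvToRem, hx, hy, hc, show PySem.Str.upper "s" = "S" from by decide]
  by_cases h5 : c = "r"
  · subst h5
    rw [show pvBeats.get? "r" = some "p" from by decide]
    by_cases hx : ("p" : String) ∈ L <;> by_cases hy : ("P" : String) ∈ L <;>
      simp [pvToRem, hx, hy, hc, show PySem.Str.upper "p" = "P" from by decide]
  by_cases h6 : c = "R"
  · subst h6
    rw [show pvBeats.get? "R" = some "p" from by decide]
    by_cases hx : ("p" : String) ∈ L <;> by_cases hy : ("P" : String) ∈ L <;>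
      simp [pvToRem, hx, hy, hc, show PySem.Str.upper "p" = "P" from by decide]
  · have hn : pvBeats.get? c = none := by
      rw [PySem.Dict.get?_eq_none_iff_not_mem_keys]
      rw [show pvBeats.keys = ["s", "S", "p", "P", "r", "R"] from by decide]
      simp [h1, h2, h3, h4, h5, h6]
    rw [hn]
    simp [pvToRem, h1, h2, h3, h4, h5, h6]

-- ===== VERDICT (by name: the statement is the Claim_ definition above) =====
theorem play_rps_spec : Claim_equal_play_rps := by
  intro L _
  unfold Spec_play_rps play_rps_alt
  rw [play_rps_eq_filter]
  exact List.filter_congr (fun c hc => point_eq L c hc)
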